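-- pv_equiv track=rewrite | github.com/SingulioDev/context-cascade | scripts/migrate-skills-to-official-format.py | parse_yaml_frontmatter
-- ===== SOURCE A (Python) =====
-- from typing import Dict, List, Optional, Tuple
--
-- def parse_yaml_frontmatter(content: str) -> Tuple[Dict, str, int, int]:
--     """Parse YAML frontmatter from SKILL.md content.
--     Returns: (frontmatter_dict, body, start_line, end_line)
--     """
--     lines = content.split('\n')
--     if not lines or lines[0].strip() != '---':
--         return {}, content, 0, 0
--
--     # Find closing ---
--     end_idx = -1
--     for i, line in enumerate(lines[1:], 1):
--         if line.strip() == '---':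
--             end_idx = i
--             break
--
--     if end_idx == -1:
--         return {}, content, 0, 0
--
--     # Parse YAML (simple key: value parsing)
--     frontmatter = {}
--     current_key = None
--     current_value = []
--
--     for line in lines[1:end_idx]:
--         # Check for new key
--         if ':' in line and not line.startswith(' ') and not line.startswith('\t'):
--             # Save previous key if exists
--             if current_key:
--                 val = '\n'.join(current_value).strip()
--                 if val.startswith('|'):
--                     val = '\n'.join(current_value[1:])
--                 frontmatter[current_key] = val
--
--             key, _, value = line.partition(':')
--             current_key = key.strip()
--             current_value = [value.strip()] if value.strip() else []
--         elif current_key: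
--             current_value.append(line)
--
--     # Save last key
--     if current_key:
--         val = '\n'.join(current_value).strip()
--         if val.startswith('|'):
--             val = '\n'.join(current_value[1:])
--         frontmatter[current_key] = val
--
--     body = '\n'.join(lines[end_idx + 1:])
--     return frontmatter, body, 0, end_idx
-- ===== SOURCE B (Python) =====
-- def _is_key_line(line):
--     return ':' in line and not line.startswith((' ', '\t'))
--
--
-- def _split_blocks(lines):
--     """Recursively partition frontmatter lines into (key, value-lines) blocks:
--     a key line opens a block, following non-key lines belong to it; non-key
--     lines before any key line are dropped."""
--     if not lines:
--         return []
--     head = lines[0]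
--     if not _is_key_line(head):
--         return _split_blocks(lines[1:])
--     j = 1
--     while j < len(lines) and not _is_key_line(lines[j]):
--         j += 1
--     key, _, value = head.partition(':')
--     v = value.strip()
--     vals = ([v] if v else []) + lines[1:j]
--     return [(key.strip(), vals)] + _split_blocks(lines[j:])
--
--
-- def parse_yaml_frontmatter(content):
--     """Parse YAML frontmatter from SKILL.md content.
--     Returns: (frontmatter_dict, body, start_line, end_line)
--     """
--     lines = content.split('\n')
--     if not lines or lines[0].strip() != '---':
--         return {}, content, 0, 0
--
--     idxs = [i for i, line in enumerate(lines[1:], 1) if line.strip() == '---']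
--     if not idxs:
--         return {}, content, 0, 0
--     end_idx = idxs[0]
--
--     frontmatter = {}
--     for key, vals in _split_blocks(lines[1:end_idx]):
--         if key:
--             val = '\n'.join(vals).strip()
--             if val.startswith('|'):
--                 val = '\n'.join(vals[1:])
--             frontmatter[key] = val
--
--     return frontmatter, '\n'.join(lines[end_idx + 1:]), 0, end_idx
-- ===== Notes on version B (the rewrite author's own statement) =====
-- stated objective: alternative
-- what changed: Replaces A's single stateful parsing loop (dict + current_key/current_value accumulator mutated in place, with a duplicated save-previous-key epilogue) by a two-phase decomposition: a recursive span-based partition of the frontmatter lines into (key, value-lines) blocks, followed by one fold of the blocks into the dict; the closing delimiter line is found by a comprehension-plus-head instead of a break loop.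
import Mathlib
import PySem

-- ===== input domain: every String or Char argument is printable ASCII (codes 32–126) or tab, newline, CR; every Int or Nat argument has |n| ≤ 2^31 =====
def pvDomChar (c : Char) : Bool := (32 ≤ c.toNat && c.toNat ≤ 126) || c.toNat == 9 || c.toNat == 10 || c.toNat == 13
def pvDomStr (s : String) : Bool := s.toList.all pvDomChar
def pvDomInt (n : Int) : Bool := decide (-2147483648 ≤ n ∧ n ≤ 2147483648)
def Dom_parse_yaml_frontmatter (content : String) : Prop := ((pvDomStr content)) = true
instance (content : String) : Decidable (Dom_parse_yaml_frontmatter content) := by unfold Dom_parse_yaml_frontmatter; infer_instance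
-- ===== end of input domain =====

-- B replaces A's single stateful parsing loop by a span-based recursive partition into
-- (key, value-lines) blocks followed by one fold into the dict (objective: alternative).

-- shared helpers: code both Pythons contain verbatim
-- ':' in line and not line.startswith(' ') / ('\t')
def pvIsKeyLine (line : String) : Bool :=
  PySem.Str.isIn ":" line && !(PySem.Str.startswith line " ") && !(PySem.Str.startswith line "\t")

-- line.partition(':') restricted to (before, after); exact when used as key, _, value:
-- if ':' is absent Python returns (line, '', '') and this returns (line, '').
def pvPartitionColon (s : String) : String × String :=
  (String.ofList (s.toList.takeWhile (· ≠ ':')),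
   String.ofList ((s.toList.dropWhile (· ≠ ':')).drop 1))

-- val = '\n'.join(vals).strip(); if val.startswith('|'): val = '\n'.join(vals[1:])
def pvJoinVal (vals : List String) : String :=
  let val := PySem.Str.strip (PySem.Str.join "\n" vals)
  if PySem.Str.startswith val "|" then PySem.Str.join "\n" (PySem.List.slice vals (some 1) none)
  else val

-- ===== PORT A =====
-- if current_key: frontmatter[current_key] = val   (used inside the loop and as the epilogue)
def pvSave (fm : PySem.Dict String String) (ck : Option String) (cv : List String) :
    PySem.Dict String String :=
  match ck with
  | some k => if k = "" then fm else fm.insert k (pvJoinVal cv)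
  | none => fm

-- the body of A's parsing loop, over state (frontmatter, current_key, current_value)
def pvStepA (st : PySem.Dict String String × Option String × List String) (line : String) :
    PySem.Dict String String × Option String × List String :=
  if pvIsKeyLine line then
    let kv := pvPartitionColon line
    let v := PySem.Str.strip kv.2
    (pvSave st.1 st.2.1 st.2.2, some (PySem.Str.strip kv.1), if v = "" then [] else [v])
  else
    match st.2.1 with
    | some k => if k = "" then st else (st.1, st.2.1, st.2.2 ++ [line])
    | none => st

-- for i, line in enumerate(lines[1:], 1): if line.strip() == '---': end_idx = i; break
def pvFindClose : List (Int × String) → Int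
  | [] => -1
  | p :: rest => if PySem.Str.strip p.2 == "---" then p.1 else pvFindClose rest

def parse_yaml_frontmatter (content : String) : (List (String × String)) × String × Int × Int :=
  let lines := (PySem.Str.split? content "\n").getD []
  if lines.isEmpty || PySem.Str.strip (lines.headD "") ≠ "---" then ([], content, 0, 0)
  else
    let end_idx := pvFindClose (PySem.List.enumerate (PySem.List.slice lines (some 1) none) 1)
    if end_idx = -1 then ([], content, 0, 0)
    else
      let st := (PySem.List.slice lines (some 1) (some end_idx)).foldl pvStepA
        (PySem.Dict.empty, none, [])
      let fm := pvSave st.1 st.2.1 st.2.2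
      (fm.items, PySem.Str.join "\n" (PySem.List.slice lines (some (end_idx + 1)) none), 0, end_idx)

-- ===== PORT B =====
def pvKeyOf (line : String) : String := PySem.Str.strip (pvPartitionColon line).1

def pvInitVals (line : String) : List String :=
  let v := PySem.Str.strip (pvPartitionColon line).2
  if v = "" then [] else [v]

-- _split_blocks: span-based recursive partition into (key, value-lines) blocks
def pvSplitBlocks : List String → List (String × List String)
  | [] => []
  | l :: ls =>
    if pvIsKeyLine l then
      (pvKeyOf l, pvInitVals l ++ ls.takeWhile (fun x => !pvIsKeyLine x)) ::
        pvSplitBlocks (ls.dropWhile (fun x => !pvIsKeyLine x))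
    else pvSplitBlocks ls
termination_by ls => ls.length
decreasing_by
  · exact Nat.lt_succ_of_le (List.length_dropWhile_le _ _)
  · exact Nat.lt_succ_self _

-- if key: frontmatter[key] = val
def pvFinishB (fm : PySem.Dict String String) (b : String × List String) :
    PySem.Dict String String :=
  if b.1 = "" then fm else fm.insert b.1 (pvJoinVal b.2)

def parse_yaml_frontmatter_alt (content : String) : (List (String × String)) × String × Int × Int :=
  let lines := (PySem.Str.split? content "\n").getD []
  if lines.isEmpty || PySem.Str.strip (lines.headD "") ≠ "---" then ([], content, 0, 0)
  else
    let idxs := ((PySem.List.enumerate (PySem.List.slice lines (some 1) none) 1).filter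
      (fun p => PySem.Str.strip p.2 == "---")).map (·.1)
    match idxs with
    | [] => ([], content, 0, 0)
    | e :: _ =>
      let fm := (pvSplitBlocks (PySem.List.slice lines (some 1) (some e))).foldl pvFinishB
        PySem.Dict.empty
      (fm.items, PySem.Str.join "\n" (PySem.List.slice lines (some (e + 1)) none), 0, e)

-- ===== PRECONDITION & SPEC =====
def Spec_parse_yaml_frontmatter (content : String) (out : (List (String × String)) × String × Int × Int) : Prop := out = parse_yaml_frontmatter_alt content
instance (content : String) (out : (List (String × String)) × String × Int × Int) : Decidable (Spec_parse_yaml_frontmatter content out) := by unfold Spec_parse_yaml_frontmatter; infer_instance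

-- ===== CLAIM (what is proved, stated in full; the proofs are below) =====
def Claim_equal_parse_yaml_frontmatter : Prop := ∀ (content : String), Dom_parse_yaml_frontmatter content → Spec_parse_yaml_frontmatter content (parse_yaml_frontmatter content)

-- ===== LEMMAS AND PROOFS =====

-- first-match recursion = head of filter
theorem pvFindClose_eq_filter (l : List (Int × String)) :
    pvFindClose l = (match l.filter (fun p => PySem.Str.strip p.2 == "---") with
      | [] => -1 | p :: _ => p.1) := by
  induction l with
  | nil => rfl
  | cons p rest ih =>
    by_cases h : PySem.Str.strip p.2 == "---" <;>
      simp [pvFindClose, h, ih]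

-- proof-side accumulator form of the block partition
def pvSplitGo (cur : Option (String × List String)) : List String → List (String × List String)
  | [] => match cur with | some b => [b] | none => []
  | l :: ls =>
    if pvIsKeyLine l then
      (match cur with | some b => [b] | none => []) ++
        pvSplitGo (some (pvKeyOf l, pvInitVals l)) ls
    else pvSplitGo (match cur with | some b => some (b.1, b.2 ++ [l]) | none => none) ls

theorem pvSplitGo_some (ls : List String) : ∀ (k : String) (acc : List String),
    pvSplitGo (some (k, acc)) ls =
      (k, acc ++ ls.takeWhile (fun x => !pvIsKeyLine x)) ::
        pvSplitBlocks (ls.dropWhile (fun x => !pvIsKeyLine x)) := by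
  induction ls with
  | nil => intro k acc; simp [pvSplitGo, pvSplitBlocks]
  | cons l ls ih =>
    intro k acc
    by_cases h : pvIsKeyLine l
    · simp [pvSplitGo, h, ih, pvSplitBlocks, List.takeWhile, List.dropWhile]
    · simp [pvSplitGo, h, ih, List.takeWhile, List.dropWhile]

theorem pvSplitGo_none (ls : List String) : pvSplitGo none ls = pvSplitBlocks ls := by
  induction ls with
  | nil => simp [pvSplitGo, pvSplitBlocks]
  | cons l ls ih =>
    by_cases h : pvIsKeyLine l
    · simp [pvSplitGo, h, pvSplitGo_some, pvSplitBlocks]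
    · simp [pvSplitGo, h, ih, pvSplitBlocks]

-- the state relation between A's loop state and the open block of the partition
def pvRel (ck : Option String) (cv : List String) (cur : Option (String × List String)) : Prop :=
  match ck, cur with
  | none, none => True
  | some k, some b => b.1 = k ∧ (k ≠ "" → b.2 = cv)
  | _, _ => False

-- main invariant: A's loop followed by its epilogue = folding the partitioned blocks
theorem pvMain (ls : List String) :
    ∀ (fm : PySem.Dict String String) (ck : Option String) (cv : List String)
      (cur : Option (String × List String)), pvRel ck cv cur →
    (let st := ls.foldl pvStepA (fm, ck, cv); pvSave st.1 st.2.1 st.2.2) =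
      (pvSplitGo cur ls).foldl pvFinishB fm := by
  induction ls with
  | nil =>
    intro fm ck cv cur hrel
    match ck, cur with
    | none, none => rfl
    | some k, some b =>
      obtain ⟨hb1, hb2⟩ := hrel
      by_cases hk : k = ""
      · simp [pvSave, pvSplitGo, pvFinishB, hb1, hk]
      · simp [pvSave, pvSplitGo, pvFinishB, hb1, hk, hb2 hk]
  | cons l ls ih =>
    intro fm ck cv cur hrel
    by_cases h : pvIsKeyLine l
    · have hemit : (match cur with | some b => [b] | none => ([] : List (String × List String))).foldl
          pvFinishB fm = pvSave fm ck cv := by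
        match ck, cur with
        | none, none => rfl
        | some k, some b =>
          obtain ⟨hb1, hb2⟩ := hrel
          by_cases hk : k = ""
          · simp [pvSave, pvFinishB, hb1, hk]
          · simp [pvSave, pvFinishB, hb1, hk, hb2 hk]
      have := ih (pvSave fm ck cv) (some (PySem.Str.strip (pvPartitionColon l).1))
        (pvInitVals l) (some (pvKeyOf l, pvInitVals l))
        (by simp [pvRel, pvKeyOf])
      simp only [pvSplitGo, h, if_pos, List.foldl_cons, List.foldl_append, hemit,
        pvStepA, pvInitVals] at this ⊢
      simpa [pvStepA, h, pvInitVals] using this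
    · match ck, cur with
      | none, none =>
        have := ih fm none cv none trivial
        simpa [pvStepA, h, pvSplitGo] using this
      | some k, some b =>
        obtain ⟨hb1, hb2⟩ := hrel
        by_cases hk : k = ""
        · have := ih fm (some k) cv (some (b.1, b.2 ++ [l]))
            (by simp [pvRel, hb1, hk])
          simpa [pvStepA, h, hk, pvSplitGo] using this
        · have := ih fm (some k) (cv ++ [l]) (some (b.1, b.2 ++ [l]))
            (by simp [pvRel, hb1, hk, hb2 hk])
          simpa [pvStepA, h, hk, pvSplitGo] using this

-- ===== VERDICT (by name: the statement is the Claim_ definition above) =====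
theorem parse_yaml_frontmatter_spec : Claim_equal_parse_yaml_frontmatter := by
  intro content _
  unfold Spec_parse_yaml_frontmatter parse_yaml_frontmatter parse_yaml_frontmatter_alt
  set lines := (PySem.Str.split? content "\n").getD [] with hlines
  by_cases hg : (lines.isEmpty || decide (PySem.Str.strip (lines.headD "") ≠ "---")) = true
  · simp only [if_pos hg]
  · simp only [if_neg hg]
    set rest := PySem.List.slice lines (some 1) none with hrest
    set en := PySem.List.enumerate rest 1 with hen
    rcases hfil : en.filter (fun p => PySem.Str.strip p.2 == "---") with _ | ⟨p, t⟩
    · have hc : pvFindClose en = -1 := by rw [pvFindClose_eq_filter, hfil]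
      simp [hc, hfil]
    · have hp : p ∈ en := by
        have : p ∈ en.filter (fun p => PySem.Str.strip p.2 == "---") := by
          rw [hfil]; exact List.mem_cons_self
        exact (List.mem_filter.1 this).1
      have hp1 : 1 ≤ p.1 := by
        rw [hen] at hp
        obtain ⟨k, hk, hpk⟩ := (PySem.List.mem_enumerate_iff rest 1 p).1 hp
        simp [hpk]
      have hclose : pvFindClose en = p.1 := by rw [pvFindClose_eq_filter, hfil]
      have hne : ¬ pvFindClose en = -1 := by omega
      simp only [hclose, hfil, List.map_cons]
      have hmain := pvMain (PySem.List.slice lines (some 1) (some p.1)) PySem.Dict.empty none []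
        none trivial
      rw [pvSplitGo_none] at hmain
      simp only [hmain]
      rw [if_neg (show ¬ (p.1 = -1) by omega)]
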